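-- pv_equiv track=rewrite | github.com/mdillondc/terminal-ai | src/search_log_engine.py | _group_temporal
-- ===== SOURCE A (Python) =====
-- from typing import Any, Dict, List, Optional, Tuple
--
-- def _group_temporal(hits: List[Dict[str, Any]]) -> Dict[str, List[Dict[str, Any]]]:
--     # Group by date (YYYY-MM-DD, None last), sort by time within date
--     buckets: Dict[str, List[Dict[str, Any]]] = {}
--     for h in hits:
--         key = h.get("date") or "(no-date)"
--         buckets.setdefault(key, []).append(h)
--
--     # Sort keys with real dates ascending, then "(no-date)"
--     def date_key(k: str):
--         if k == "(no-date)":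
--             return (1, k)
--         return (0, k)
--
--     ordered: Dict[str, List[Dict[str, Any]]] = {}
--     for d in sorted(buckets.keys(), key=date_key):
--         items = buckets[d]
--         # Within a date, order by time ascending where available
--         def time_key(h: Dict[str, Any]):
--             t = h.get("time")
--             return ("~" if t is None else t)  # "~" sorts after numeric-like strings
--         items_sorted = sorted(items, key=time_key)
--         ordered[d] = items_sorted
--     return ordered
-- ===== SOURCE B (Python) =====
-- from typing import Any, Dict, List
--
--
-- def _group_temporal(hits: List[Dict[str, Any]]) -> Dict[str, List[Dict[str, Any]]]:
--     # One global stable sort (time pass, then date pass), then a single grouping pass.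
--     def _bucket_key(h: Dict[str, Any]) -> str:
--         return h.get("date") or "(no-date)"
--
--     def _time_key(h: Dict[str, Any]) -> str:
--         t = h.get("time")
--         return "~" if t is None else t
--
--     by_time = sorted(hits, key=_time_key)
--     ordered_hits = sorted(
--         by_time,
--         key=lambda h: (1 if _bucket_key(h) == "(no-date)" else 0, _bucket_key(h)),
--     )
--
--     result: Dict[str, List[Dict[str, Any]]] = {}
--     for h in ordered_hits:
--         result.setdefault(_bucket_key(h), []).append(h)
--     return result
-- ===== Notes on version B (the rewrite author's own statement) =====
-- stated objective: alternative
-- what changed: Instead of bucketing hits by date first and then sorting the key list and each bucket separately, B stable-sorts the whole hit list globally (by time, then by (no-date-last, date)) and builds the grouped dict in one grouping pass with setdefault.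
import Mathlib
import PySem

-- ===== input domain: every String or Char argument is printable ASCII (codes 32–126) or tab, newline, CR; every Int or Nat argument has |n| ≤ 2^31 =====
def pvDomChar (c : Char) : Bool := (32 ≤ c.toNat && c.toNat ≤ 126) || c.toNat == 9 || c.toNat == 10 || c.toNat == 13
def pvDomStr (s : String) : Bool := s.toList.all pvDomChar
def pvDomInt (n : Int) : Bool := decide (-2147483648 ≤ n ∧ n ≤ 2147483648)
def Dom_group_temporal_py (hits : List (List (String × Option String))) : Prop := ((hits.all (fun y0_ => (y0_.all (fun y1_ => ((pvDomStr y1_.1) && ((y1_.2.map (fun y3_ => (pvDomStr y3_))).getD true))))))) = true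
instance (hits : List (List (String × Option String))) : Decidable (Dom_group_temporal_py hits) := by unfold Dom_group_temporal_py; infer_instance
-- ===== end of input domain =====

-- B replaces A's bucket-then-sort-keys-then-sort-each-bucket scheme by two global stable
-- sorts followed by a single grouping pass (objective: alternative, same asymptotic cost).

-- ===== PORT A =====
-- h.get(k) (missing key and stored None both give Python None)
def pvGet (h : List (String × Option String)) (k : String) : Option String :=
  ((PySem.Dict.mk h).get? k).getD none

-- h.get("date") or "(no-date)"   (falsy: None and "")
def pvBucketKey (h : List (String × Option String)) : String :=
  match pvGet h "date" with
  | some d => if d = "" then "(no-date)" else d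
  | none => "(no-date)"

-- "~" if h.get("time") is None else h.get("time")
def pvTimeKey (h : List (String × Option String)) : String :=
  match pvGet h "time" with
  | some t => t
  | none => "~"

-- first component of A's date_key tuple (0 for real dates, 1 for "(no-date)")
def pvRank (k : String) : Int := if k = "(no-date)" then 1 else 0

def group_temporal_py (hits : List (List (String × Option String))) :
    List (String × List (List (String × Option String))) :=
  -- buckets.setdefault(key, []).append(h)
  let buckets := hits.foldl (fun d h => d.modify (pvBucketKey h) [] (· ++ [h])) PySem.Dict.empty
  -- sorted(buckets.keys(), key=date_key) with date_key k = (rank k, k)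
  let ks := PySem.List.sorted2 buckets.keys pvRank (fun k => k)
  -- ordered[d] = sorted(buckets[d], key=time_key)
  let ordered := ks.foldl
    (fun od d => od.insert d (PySem.List.sorted (buckets.getD d []) pvTimeKey)) PySem.Dict.empty
  ordered.items

-- ===== PORT B =====
def group_temporal_py_alt (hits : List (List (String × Option String))) :
    List (String × List (List (String × Option String))) :=
  -- by_time = sorted(hits, key=_time_key)
  let byTime := PySem.List.sorted hits pvTimeKey
  -- ordered_hits = sorted(by_time, key=lambda h: (rank, bucket_key))
  let orderedHits := PySem.List.sorted2 byTime (fun h => pvRank (pvBucketKey h)) pvBucketKey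
  -- result.setdefault(_bucket_key(h), []).append(h)
  let result := orderedHits.foldl (fun d h => d.modify (pvBucketKey h) [] (· ++ [h])) PySem.Dict.empty
  result.items

-- ===== PRECONDITION & SPEC =====
def Spec_group_temporal_py (hits : List (List (String × Option String))) (out : List (String × List (List (String × Option String)))) : Prop := out = group_temporal_py_alt hits
instance (hits : List (List (String × Option String))) (out : List (String × List (List (String × Option String)))) : Decidable (Spec_group_temporal_py hits out) := by unfold Spec_group_temporal_py; infer_instance

-- ===== CLAIM (what is proved, stated in full; the proofs are below) =====
def Claim_equal_group_temporal_py : Prop := ∀ (hits : List (List (String × Option String))), Dom_group_temporal_py hits → Spec_group_temporal_py hits (group_temporal_py hits)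

-- ===== LEMMAS AND PROOFS =====

-- Python's stable sort, as PySem implements it: a fold of insertBy, with a key function.
def pvIsort {α κ : Type} [LinearOrder κ] (e : α → κ) (xs : List α) : List α :=
  xs.foldl (fun acc x => PySem.List.insertBy (fun a b => decide (e a < e b)) x acc) []

lemma pvInsertBy_nil {α : Type} (b : α → α → Bool) (x : α) :
    PySem.List.insertBy b x [] = [x] := rfl

lemma pvInsertBy_cons {α : Type} (b : α → α → Bool) (x y : α) (ys : List α) :
    PySem.List.insertBy b x (y :: ys)
      = if b x y then x :: y :: ys else y :: PySem.List.insertBy b x ys := rfl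

lemma pvInsertBy_perm {α : Type} (b : α → α → Bool) (x : α) (ys : List α) :
    (PySem.List.insertBy b x ys).Perm (x :: ys) := by
  induction ys with
  | nil => rw [pvInsertBy_nil]
  | cons y ys ih =>
    rw [pvInsertBy_cons]
    split
    · exact .refl _
    · exact (ih.cons y).trans (List.Perm.swap x y ys)

lemma pvFoldl_insertBy_perm {α : Type} (b : α → α → Bool) (xs : List α) :
    ∀ acc : List α,
      (xs.foldl (fun acc x => PySem.List.insertBy b x acc) acc).Perm (acc ++ xs) := by
  induction xs with
  | nil => intro acc; simp
  | cons x xs ih =>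
    intro acc
    refine (ih _).trans ?_
    exact (((pvInsertBy_perm b x acc).append_right xs).trans List.perm_middle.symm)

lemma pvIsort_perm {α κ : Type} [LinearOrder κ] (e : α → κ) (xs : List α) :
    (pvIsort e xs).Perm xs := by
  simpa using pvFoldl_insertBy_perm (fun a b => decide (e a < e b)) xs []

lemma pvInsertBy_sorted {α κ : Type} [LinearOrder κ] (e : α → κ) (x : α) {ys : List α}
    (h : ys.Pairwise (fun a b => e a ≤ e b)) :
    (PySem.List.insertBy (fun a b => decide (e a < e b)) x ys).Pairwise
      (fun a b => e a ≤ e b) := by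
  induction ys with
  | nil => simp [pvInsertBy_nil]
  | cons y ys ih =>
    rcases List.pairwise_cons.mp h with ⟨hy, hys⟩
    rw [pvInsertBy_cons]
    by_cases hxy : e x < e y
    · rw [if_pos (by simpa using hxy)]
      refine List.pairwise_cons.mpr ⟨?_, h⟩
      intro z hz
      rcases List.mem_cons.mp hz with rfl | hz
      · exact hxy.le
      · exact hxy.le.trans (hy z hz)
    · rw [if_neg (by simpa using hxy)]
      refine List.pairwise_cons.mpr ⟨?_, ih hys⟩
      intro z hz
      rcases (PySem.List.mem_insertBy _ _ _ _).mp hz with rfl | hz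
      · exact not_lt.mp hxy
      · exact hy z hz

lemma pvFoldl_insertBy_sorted {α κ : Type} [LinearOrder κ] (e : α → κ) (xs : List α) :
    ∀ acc : List α, acc.Pairwise (fun a b => e a ≤ e b) →
      (xs.foldl (fun acc x => PySem.List.insertBy (fun a b => decide (e a < e b)) x acc)
        acc).Pairwise (fun a b => e a ≤ e b) := by
  induction xs with
  | nil => intro acc hacc; simpa using hacc
  | cons x xs ih =>
    intro acc hacc
    exact ih _ (pvInsertBy_sorted e x hacc)

lemma pvIsort_sorted {α κ : Type} [LinearOrder κ] (e : α → κ) (xs : List α) :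
    (pvIsort e xs).Pairwise (fun a b => e a ≤ e b) :=
  pvFoldl_insertBy_sorted e xs [] (by simp)

-- filtering commutes with a stable insertion sort
lemma pvInsertBy_filter {α κ : Type} [LinearOrder κ] (e : α → κ) (p : α → Bool) (x : α)
    {ys : List α} (h : ys.Pairwise (fun a b => e a ≤ e b)) :
    (PySem.List.insertBy (fun a b => decide (e a < e b)) x ys).filter p
      = if p x then PySem.List.insertBy (fun a b => decide (e a < e b)) x (ys.filter p)
        else ys.filter p := by
  induction ys with
  | nil =>
    rw [pvInsertBy_nil]
    cases hpx : p x <;> simp [hpx, pvInsertBy_nil]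
  | cons y ys ih =>
    rcases List.pairwise_cons.mp h with ⟨hy, hys⟩
    rw [pvInsertBy_cons]
    by_cases hxy : e x < e y
    · rw [if_pos (by simpa using hxy)]
      cases hpx : p x
      · simp [List.filter_cons, hpx]
      · have hins : PySem.List.insertBy (fun a b => decide (e a < e b)) x ((y :: ys).filter p)
            = x :: (y :: ys).filter p := by
          have hall : ∀ z ∈ (y :: ys).filter p, e x < e z := by
            intro z hz
            rcases List.mem_cons.mp (List.mem_of_mem_filter hz) with rfl | hz'
            · exact hxy
            · exact hxy.trans_le (hy z hz')
          cases hzs : (y :: ys).filter p with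
          | nil => rw [pvInsertBy_nil]
          | cons z zs =>
            rw [pvInsertBy_cons,
              if_pos (by simpa using hall z (hzs ▸ List.mem_cons_self))]
        simp only [hpx, if_true, hins]
        simp [List.filter_cons, hpx]
    · rw [if_neg (by simpa using hxy)]
      rw [List.filter_cons, ih hys]
      cases hpy : p y <;> cases hpx : p x <;>
        simp [List.filter_cons, hpy, hpx, pvInsertBy_cons, hxy]

lemma pvFoldl_insertBy_filter {α κ : Type} [LinearOrder κ] (e : α → κ) (p : α → Bool)
    (xs : List α) :
    ∀ acc : List α, acc.Pairwise (fun a b => e a ≤ e b) →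
      ((xs.foldl (fun acc x => PySem.List.insertBy (fun a b => decide (e a < e b)) x acc)
        acc).filter p)
      = (xs.filter p).foldl
          (fun acc x => PySem.List.insertBy (fun a b => decide (e a < e b)) x acc)
          (acc.filter p) := by
  induction xs with
  | nil => intro acc _; simp
  | cons x xs ih =>
    intro acc hacc
    rw [List.foldl_cons, ih _ (pvInsertBy_sorted e x hacc), pvInsertBy_filter e p x hacc]
    cases hpx : p x
    · simp [List.filter_cons, hpx]
    · simp [List.filter_cons, hpx]

lemma pvIsort_filter {α κ : Type} [LinearOrder κ] (e : α → κ) (p : α → Bool) (xs : List α) :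
    (pvIsort e xs).filter p = pvIsort e (xs.filter p) := by
  simpa using pvFoldl_insertBy_filter e p xs [] (by simp)

-- mapping under the key commutes with the sort
lemma pvInsertBy_map {α β κ : Type} [LinearOrder κ] (e : β → κ) (f : α → β) (x : α)
    (ys : List α) :
    (PySem.List.insertBy (fun a b => decide (e (f a) < e (f b))) x ys).map f
      = PySem.List.insertBy (fun a b => decide (e a < e b)) (f x) (ys.map f) := by
  induction ys with
  | nil => simp [pvInsertBy_nil]
  | cons y ys ih =>
    rw [pvInsertBy_cons, List.map_cons, pvInsertBy_cons]
    by_cases h : e (f x) < e (f y)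
    · rw [if_pos (by simpa using h), if_pos (by simpa using h)]
      simp
    · rw [if_neg (by simpa using h), if_neg (by simpa using h)]
      simp [ih]

lemma pvFoldl_insertBy_map {α β κ : Type} [LinearOrder κ] (e : β → κ) (f : α → β)
    (xs : List α) :
    ∀ acc : List α,
      ((xs.foldl
          (fun acc x => PySem.List.insertBy (fun a b => decide (e (f a) < e (f b))) x acc)
          acc).map f)
      = (xs.map f).foldl
          (fun acc x => PySem.List.insertBy (fun a b => decide (e a < e b)) x acc)
          (acc.map f) := by
  induction xs with
  | nil => intro acc; simp
  | cons x xs ih =>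
    intro acc
    rw [List.foldl_cons, ih, pvInsertBy_map, List.map_cons, List.foldl_cons]

lemma pvIsort_map {α β κ : Type} [LinearOrder κ] (e : β → κ) (f : α → β) (xs : List α) :
    (pvIsort (fun a => e (f a)) xs).map f = pvIsort e (xs.map f) := by
  simpa using pvFoldl_insertBy_map e f xs []

-- a list whose keys are all equal is left unchanged by the sort
lemma pvFoldl_insertBy_const {α κ : Type} [LinearOrder κ] (e : α → κ) (c : κ)
    (xs : List α) :
    ∀ acc : List α, (∀ a ∈ acc, e a = c) → (∀ a ∈ xs, e a = c) →
      xs.foldl (fun acc x => PySem.List.insertBy (fun a b => decide (e a < e b)) x acc) acc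
        = acc ++ xs := by
  induction xs with
  | nil => intro acc _ _; simp
  | cons x xs ih =>
    intro acc hacc hxs
    have hx : e x = c := hxs x (List.mem_cons_self)
    have happ : PySem.List.insertBy (fun a b => decide (e a < e b)) x acc = acc ++ [x] := by
      refine PySem.List.insertBy_of_forall_not_before _ _ _ ?_
      intro y hy
      simp [hx, hacc y hy]
    rw [List.foldl_cons, happ,
      ih (acc ++ [x])
        (by intro a ha
            rcases List.mem_append.mp ha with ha | ha
            · exact hacc a ha
            · simpa using (List.mem_singleton.mp ha ▸ hx))
        (fun a ha => hxs a (List.mem_cons_of_mem x ha))]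
    simp

lemma pvIsort_const {α κ : Type} [LinearOrder κ] (e : α → κ) (c : κ) (xs : List α)
    (h : ∀ a ∈ xs, e a = c) : pvIsort e xs = xs := by
  simpa using pvFoldl_insertBy_const e c xs [] (by simp) h

-- uniqueness: a strictly key-increasing rearrangement is THE sorted order
lemma pvSorted_unique {α κ : Type} [LinearOrder κ] (e : α → κ) :
    ∀ (m : List α), ∀ n, m.Perm n → m.Pairwise (fun a b => e a < e b) →
      n.Pairwise (fun a b => e a ≤ e b) → n = m := by
  intro m
  induction m with
  | nil =>
    intro n h _ _
    exact h.symm.eq_nil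
  | cons a m ih =>
    intro n hperm hm hn
    cases n with
    | nil => exact absurd hperm.symm (by simp)
    | cons b n =>
      have hab : a = b := by
        by_contra hne
        have hbmem : b ∈ a :: m := hperm.symm.subset (List.mem_cons_self)
        have hamem : a ∈ b :: n := hperm.subset (List.mem_cons_self)
        have hb' : b ∈ m := by
          rcases List.mem_cons.mp hbmem with h | h
          · exact absurd h.symm hne
          · exact h
        have ha' : a ∈ n := by
          rcases List.mem_cons.mp hamem with h | h
          · exact absurd h hne
          · exact h
        have h1 : e a < e b := (List.pairwise_cons.mp hm).1 b hb'
        have h2 : e b ≤ e a := (List.pairwise_cons.mp hn).1 a ha'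
        exact absurd h1 (not_lt.mpr h2)
      subst hab
      have htail : n = m :=
        ih n hperm.cons_inv (List.pairwise_cons.mp hm).2 (List.pairwise_cons.mp hn).2
      rw [htail]

lemma pvIsort_eq_of_perm_of_pairwise {α κ : Type} [LinearOrder κ] (e : α → κ)
    {xs m : List α} (hperm : m.Perm xs) (hpw : m.Pairwise (fun a b => e a < e b)) :
    pvIsort e xs = m :=
  pvSorted_unique e m (pvIsort e xs) (hperm.trans (pvIsort_perm e xs).symm) hpw
    (pvIsort_sorted e xs)

-- bridges from PySem's sorted / sorted2 to pvIsort
lemma pvSorted_eq {α κ : Type} [LinearOrder κ] (xs : List α) (key : α → κ) :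
    PySem.List.sorted xs key false = pvIsort key xs := rfl

lemma pvLexBool {κ₁ κ₂ : Type} [LinearOrder κ₁] [LinearOrder κ₂] (a₁ b₁ : κ₁)
    (a₂ b₂ : κ₂) :
    (decide (a₁ < b₁) || (!decide (b₁ < a₁) && decide (a₂ < b₂)))
      = decide (toLex (a₁, a₂) < toLex (b₁, b₂)) := by
  rcases lt_trichotomy a₁ b₁ with h | h | h
  · simp [h, Prod.Lex.lt_iff]
  · subst h
    simp [Prod.Lex.lt_iff, lt_irrefl]
  · simp [Prod.Lex.lt_iff, h, h.asymm, h.ne']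

lemma pvSorted2_eq {α κ₁ κ₂ : Type} [LinearOrder κ₁] [LinearOrder κ₂] (xs : List α)
    (k1 : α → κ₁) (k2 : α → κ₂) :
    PySem.List.sorted2 xs k1 k2 false = pvIsort (fun a => toLex (k1 a, k2 a)) xs := by
  show List.foldl
      (fun acc x =>
        PySem.List.insertBy
          (fun a b => decide (k1 a < k1 b) || (!decide (k1 b < k1 a) && decide (k2 a < k2 b)))
          x acc) [] xs = _
  have hb : (fun (a b : α) =>
        decide (k1 a < k1 b) || (!decide (k1 b < k1 a) && decide (k2 a < k2 b)))
      = (fun (a b : α) =>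
        decide ((fun a => toLex (k1 a, k2 a)) a < (fun a => toLex (k1 a, k2 a)) b)) := by
    funext a b
    simpa using pvLexBool (k1 a) (k1 b) (k2 a) (k2 b)
  rw [hb]
  rfl

-- dedup is a sublist (keeps first occurrences in order)
lemma pvFoldl_add_sublist {α : Type} [BEq α] (xs : List α) :
    ∀ acc : List α, (xs.foldl PySem.Set.add acc).Sublist (acc ++ xs) := by
  induction xs with
  | nil => intro acc; simp
  | cons x xs ih =>
    intro acc
    refine (ih (PySem.Set.add acc x)).trans ?_
    unfold PySem.Set.add
    split
    · exact (List.append_sublist_append_left acc).mpr (List.sublist_cons_self x xs)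
    · simp

lemma pvDedup_sublist {α : Type} [BEq α] (xs : List α) :
    (PySem.List.dedup xs).Sublist xs := by
  rw [PySem.List.dedup_eq_ofList]
  simpa using pvFoldl_add_sublist xs []

lemma pvDedup_perm_dedup {α : Type} [BEq α] [LawfulBEq α] {l l' : List α} (h : l.Perm l') :
    (PySem.List.dedup l).Perm (PySem.List.dedup l') := by
  refine (List.perm_ext_iff_of_nodup (PySem.List.nodup_dedup l) (PySem.List.nodup_dedup l')).mpr ?_
  intro a
  simp [PySem.List.mem_dedup, h.mem_iff]

-- ===== grouping-fold facts (shared by both ports' dict loops) =====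

lemma pvGroupFold_eq_pairFold (l : List (List (String × Option String))) :
    l.foldl (fun d h => d.modify (pvBucketKey h) [] (· ++ [h])) PySem.Dict.empty
      = (l.map (fun h => (pvBucketKey h, h))).foldl
          (fun d p => d.modify p.1 [] (· ++ [p.2])) PySem.Dict.empty :=
  (List.foldl_map (f := fun h => (pvBucketKey h, h))
    (g := fun d p => d.modify p.1 [] (· ++ [p.2])) (l := l)
    (init := PySem.Dict.empty)).symm

lemma pvGroupGetD (l : List (List (String × Option String))) (c : String) :
    (l.foldl (fun d h => d.modify (pvBucketKey h) [] (· ++ [h])) PySem.Dict.empty).getD c []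
      = l.filter (fun h => pvBucketKey h == c) := by
  rw [pvGroupFold_eq_pairFold, PySem.Dict.getD_foldl_modify_append, PySem.Dict.getD_empty,
    List.filter_map]
  simp [Function.comp_def]

lemma pvGroupKeys (l : List (List (String × Option String))) :
    (l.foldl (fun d h => d.modify (pvBucketKey h) [] (· ++ [h])) PySem.Dict.empty).keys
      = PySem.List.dedup (l.map pvBucketKey) := by
  rw [PySem.Dict.keys_foldl_modify_key l pvBucketKey [] (fun _ h => (· ++ [h])),
    PySem.Dict.keys_empty, PySem.Set.update_nil_left, PySem.List.dedup_eq_ofList]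

lemma pvGroupNodupKeys (l : List (List (String × Option String))) :
    (l.foldl (fun d h => d.modify (pvBucketKey h) [] (· ++ [h])) PySem.Dict.empty).keys.Nodup :=
  PySem.Dict.nodup_keys_foldl_modify_key l pvBucketKey [] (fun _ h => (· ++ [h]))
    PySem.Dict.empty PySem.Dict.nodup_keys_empty

lemma pvGroupItems (l : List (List (String × Option String))) :
    (l.foldl (fun d h => d.modify (pvBucketKey h) [] (· ++ [h])) PySem.Dict.empty).items
      = (PySem.List.dedup (l.map pvBucketKey)).map
          (fun k => (k, l.filter (fun h => pvBucketKey h == k))) := by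
  rw [PySem.Dict.items_eq_map_keys _ (pvGroupNodupKeys l) [], pvGroupKeys]
  exact List.map_congr_left fun k _ => by rw [pvGroupGetD]

-- ===== the two key facts relating A and B =====

-- each bucket of B's globally sorted list is A's time-sorted bucket
lemma pvBucketFilter (hits : List (List (String × Option String))) (c : String) :
    (PySem.List.sorted2 (PySem.List.sorted hits pvTimeKey)
        (fun h => pvRank (pvBucketKey h)) pvBucketKey).filter (fun h => pvBucketKey h == c)
      = PySem.List.sorted (hits.filter (fun h => pvBucketKey h == c)) pvTimeKey := by
  rw [pvSorted2_eq, pvSorted_eq, pvSorted_eq, pvIsort_filter, pvIsort_filter]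
  refine pvIsort_const _ (toLex (pvRank c, c)) _ ?_
  intro a ha
  have ha' : a ∈ (hits.filter (fun h => pvBucketKey h == c)) :=
    (pvIsort_perm _ _).subset ha
  have hc : pvBucketKey a = c := by
    have := (List.mem_filter.mp ha').2
    simpa using this
  simp [hc]

-- B's key order (first occurrences in the sorted list) is A's sorted key list
lemma pvKeysEq (hits : List (List (String × Option String))) :
    PySem.List.sorted2 (PySem.List.dedup (hits.map pvBucketKey)) pvRank (fun k => k)
      = PySem.List.dedup
          ((PySem.List.sorted2 (PySem.List.sorted hits pvTimeKey)
              (fun h => pvRank (pvBucketKey h)) pvBucketKey).map pvBucketKey) := by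
  rw [pvSorted2_eq, pvSorted2_eq, pvSorted_eq]
  have hmap : ((pvIsort (fun a => toLex (pvRank (pvBucketKey a), pvBucketKey a))
        (pvIsort pvTimeKey hits)).map pvBucketKey)
      = pvIsort (fun k => toLex (pvRank k, k)) ((pvIsort pvTimeKey hits).map pvBucketKey) :=
    pvIsort_map (fun k => toLex (pvRank k, k)) pvBucketKey (pvIsort pvTimeKey hits)
  refine pvIsort_eq_of_perm_of_pairwise _ ?_ ?_
  · -- permutation of the two dedups
    refine pvDedup_perm_dedup ?_
    exact ((pvIsort_perm _ _).trans (pvIsort_perm _ _)).map pvBucketKey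
  · -- strict pairwise on the dedup of the sorted key list
    have hsorted : ((pvIsort (fun a => toLex (pvRank (pvBucketKey a), pvBucketKey a))
          (pvIsort pvTimeKey hits)).map pvBucketKey).Pairwise
        (fun a b => toLex (pvRank a, a) ≤ toLex (pvRank b, b)) := by
      rw [hmap]
      exact pvIsort_sorted _ _
    have hsub := pvDedup_sublist
      ((pvIsort (fun a => toLex (pvRank (pvBucketKey a), pvBucketKey a))
          (pvIsort pvTimeKey hits)).map pvBucketKey)
    have hnd := PySem.List.nodup_dedup
      ((pvIsort (fun a => toLex (pvRank (pvBucketKey a), pvBucketKey a))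
          (pvIsort pvTimeKey hits)).map pvBucketKey)
    have hpw := (hsorted.sublist hsub).and hnd
    refine hpw.imp ?_
    rintro a b ⟨hle, hne⟩
    refine lt_of_le_of_ne hle ?_
    intro he
    exact hne (congrArg (fun x => (ofLex x).2) he)

-- main equivalence
lemma pvMain (hits : List (List (String × Option String))) :
    group_temporal_py hits = group_temporal_py_alt hits := by
  show (
    (PySem.List.sorted2
        (hits.foldl (fun d h => d.modify (pvBucketKey h) [] (· ++ [h])) PySem.Dict.empty).keys
        pvRank (fun k => k)).foldl
      (fun od d => od.insert d
        (PySem.List.sorted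
          ((hits.foldl (fun d h => d.modify (pvBucketKey h) [] (· ++ [h]))
              PySem.Dict.empty).getD d [])
          pvTimeKey))
      PySem.Dict.empty).items
    = ((PySem.List.sorted2 (PySem.List.sorted hits pvTimeKey)
          (fun h => pvRank (pvBucketKey h)) pvBucketKey).foldl
        (fun d h => d.modify (pvBucketKey h) [] (· ++ [h])) PySem.Dict.empty).items
  rw [pvGroupKeys]
  have hksNodup :
      (PySem.List.sorted2 (PySem.List.dedup (hits.map pvBucketKey)) pvRank
        (fun k => k)).Nodup :=
    (PySem.List.sorted2_perm _ _ _ _).nodup_iff.mpr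
      (PySem.List.nodup_dedup (hits.map pvBucketKey))
  have hfresh := PySem.Dict.items_foldl_insert_fresh
    (PySem.List.sorted2 (PySem.List.dedup (hits.map pvBucketKey)) pvRank (fun k => k))
    (fun d => d)
    (fun d => PySem.List.sorted
      ((hits.foldl (fun d h => d.modify (pvBucketKey h) [] (· ++ [h]))
          PySem.Dict.empty).getD d [])
      pvTimeKey)
    PySem.Dict.empty
    (fun a _ => PySem.Dict.contains_empty a)
    (by simpa using hksNodup)
  rw [hfresh, pvGroupItems]
  have hempty : (PySem.Dict.empty :
      PySem.Dict String (List (List (String × Option String)))).items = [] := rfl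
  rw [hempty, List.nil_append]
  rw [pvKeysEq hits]
  refine List.map_congr_left ?_
  intro k _
  beta_reduce
  rw [pvGroupGetD, pvBucketFilter]

-- ===== VERDICT (by name: the statement is the Claim_ definition above) =====
theorem group_temporal_py_spec : Claim_equal_group_temporal_py := by
  intro hits _
  unfold Spec_group_temporal_py
  exact pvMain hits
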